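-- pv_equiv track=rewrite | github.com/Furman-Lab/PatchMAN | extract_peps_for_motif.py | choose_stretches_only
-- ===== SOURCE A (Python) =====
-- def choose_stretches_only(env_res, chain_breaks, peplen, tot_res):
--     stretches = []
--     stretch = [env_res[0]]
--     for i, res in enumerate(env_res):
--         if i == len(env_res) - 1:  # The END
--             if len(stretch) < 2:
--                 break
--             else:
--                 for st in elongate_stretch(stretch, peplen, tot_res, chain_breaks):
--                     stretches.append(st)
--         elif len(stretch) >= peplen: # the stretch is long enough
--             stretches.append(stretch)
--             stretch = [env_res[i + 1]]
--         # check if the res are sequential and that they are belong to the same chain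
--         elif int(res) + 1 == int(env_res[i + 1]) \
--                 and int(res) + 1 not in chain_breaks:
--             stretch.append(env_res[i + 1])
--         elif len(stretch) >= 2:
--             for st in elongate_stretch(stretch, peplen, tot_res, chain_breaks):
--                 stretches.append(st)
--             stretch = [env_res[i + 1]]
--         else:
--             stretch = [env_res[i + 1]]
--     return stretches
--
-- def elongate_stretch(stretch, peplen, tot_res, chain_breaks):
--     """Elongate stretches that are shorter than the peptide seq"""
--     dif = peplen - len(stretch)
--     new_stretch = []
--     stretches = []
--
--     first_res = int(stretch[0]) - dif  # from which we CAN start??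
--     while first_res <= 0:
--         first_res += 1
--         if first_res == int(stretch[0]):
--             break
--     for i in range(first_res, int(stretch[0]) + 1):
--         if i+peplen > tot_res + 1:
--             break
--         for j in range(i, i+peplen):
--             new_stretch.append(j)
--             if j in chain_breaks:
--                 break
--         if len(new_stretch) == peplen:
--             stretches.append(new_stretch)
--         new_stretch = []
--
--     return stretches
-- ===== SOURCE B (Python) =====
-- def elongate_stretch(stretch, peplen, tot_res, chain_breaks):
--     """Elongate stretches that are shorter than the peptide seq"""
--     dif = peplen - len(stretch)
--     new_stretch = []
--     stretches = []
--
--     first_res = int(stretch[0]) - dif  # from which we CAN start??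
--     while first_res <= 0:
--         first_res += 1
--         if first_res == int(stretch[0]):
--             break
--     for i in range(first_res, int(stretch[0]) + 1):
--         if i+peplen > tot_res + 1:
--             break
--         for j in range(i, i+peplen):
--             new_stretch.append(j)
--             if j in chain_breaks:
--                 break
--         if len(new_stretch) == peplen:
--             stretches.append(new_stretch)
--         new_stretch = []
--
--     return stretches
--
--
-- def choose_stretches_only(env_res, chain_breaks, peplen, tot_res):
--     # Pass 1: split env_res into its maximal runs of sequential residues
--     # that stay within one chain.
--     runs = [[env_res[0]]]
--     for prev, cur in zip(env_res, env_res[1:]):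
--         if int(prev) + 1 == int(cur) and int(prev) + 1 not in chain_breaks:
--             runs[-1].append(cur)
--         else:
--             runs.append([cur])
--     # Pass 2: cut every run into full peplen-sized stretches and elongate the
--     # leftover tail (a tail shorter than 2 residues is useless and dropped).
--     # The final residue of env_res only ever extends a stretch, so in the last
--     # run even a full-length tail goes through elongation.
--     stretches = []
--     for run in runs[:-1]:
--         n_full = len(run) // peplen
--         stretches += [run[k * peplen:(k + 1) * peplen] for k in range(n_full)]
--         tail = run[n_full * peplen:]
--         if len(tail) >= 2:
--             stretches += elongate_stretch(tail, peplen, tot_res, chain_breaks)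
--     last = runs[-1]
--     n_full = (len(last) - 1) // peplen
--     stretches += [last[k * peplen:(k + 1) * peplen] for k in range(n_full)]
--     tail = last[n_full * peplen:]
--     if len(tail) >= 2:
--         stretches += elongate_stretch(tail, peplen, tot_res, chain_breaks)
--     return stretches
-- ===== Notes on version B (the rewrite author's own statement) =====
-- stated objective: alternative
-- what changed: A's single interleaved loop carrying (stretches, stretch) state with env_res[i+1] lookahead is replaced by two independent passes: split env_res into maximal sequential same-chain runs, then cut each run into its full peplen-sized stretches by slice arithmetic (len(run)//peplen chunks; in the last run the final residue never completes a direct chunk) and pass only the leftover tail through the unchanged elongate_stretch; …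
-- intended difference: For negative peplen with at least two residues A returns one length-1 stretch per non-final residue - stretches that cannot have the requested peptide length - while B returns no stretches, the intended result for an impossible peptide length. — e.g. on choose_stretches_only([1, 2], [], -1, 5): A returns [[1]], B returns []
-- outside the precondition, e.g. on choose_stretches_only([1, 2, 3], set(), 0, 10): A returns [[1], [2]], B raises ZeroDivisionError
import Mathlib
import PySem

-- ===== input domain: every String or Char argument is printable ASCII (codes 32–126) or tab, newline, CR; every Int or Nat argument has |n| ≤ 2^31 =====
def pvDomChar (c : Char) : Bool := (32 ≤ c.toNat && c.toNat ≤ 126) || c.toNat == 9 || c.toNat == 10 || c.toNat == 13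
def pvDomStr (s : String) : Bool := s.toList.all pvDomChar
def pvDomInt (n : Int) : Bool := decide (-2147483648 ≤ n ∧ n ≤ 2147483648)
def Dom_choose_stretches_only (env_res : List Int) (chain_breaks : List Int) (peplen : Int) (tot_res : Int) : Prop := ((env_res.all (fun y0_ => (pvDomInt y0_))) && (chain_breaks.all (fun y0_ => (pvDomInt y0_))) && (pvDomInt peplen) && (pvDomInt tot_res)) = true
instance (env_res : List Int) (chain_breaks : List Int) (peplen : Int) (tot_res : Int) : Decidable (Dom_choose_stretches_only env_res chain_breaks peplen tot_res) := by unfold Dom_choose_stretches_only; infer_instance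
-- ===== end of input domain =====

-- B re-decomposes A's single interleaved loop into two passes (split into maximal
-- sequential runs, then chunk each run arithmetically and elongate the tail); the
-- helper elongate_stretch is kept unchanged and shared by both ports.

-- ===== SHARED HELPER: elongate_stretch (identical in Source A and Source B) =====

-- while first_res <= 0: first_res += 1; if first_res == int(stretch[0]): break
def pyElong_first (first_res s0 : Int) : Int :=
  if first_res ≤ 0 then
    if first_res + 1 = s0 then first_res + 1 else pyElong_first (first_res + 1) s0
  else first_res
termination_by (1 - first_res).toNat
decreasing_by simp_wf; omega

-- for j in range(i, i+peplen): new_stretch.append(j); if j in chain_breaks: break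
def pyElong_inner (cb : List Int) : List Int → List Int → List Int
  | [], acc => acc
  | j :: rest, acc =>
    if j ∈ cb then acc ++ [j] else pyElong_inner cb rest (acc ++ [j])

-- for i in range(first_res, int(stretch[0]) + 1): …
def pyElong_outer (p tot : Int) (cb : List Int) : List Int → List (List Int) → List (List Int)
  | [], acc => acc
  | i :: rest, acc =>
    if i + p > tot + 1 then acc
    else
      let ns := pyElong_inner cb (PySem.List.pyRange i (i + p) 1) []
      pyElong_outer p tot cb rest (if (ns.length : Int) = p then acc ++ [ns] else acc)

def pyElong (stretch : List Int) (p tot : Int) (cb : List Int) : List (List Int) :=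
  match stretch with
  | [] => []  -- guard: neither program calls elongate_stretch on an empty stretch
  | s0 :: _ =>
    let dif := p - (stretch.length : Int)
    let fr := pyElong_first (s0 - dif) s0
    pyElong_outer p tot cb (PySem.List.pyRange fr (s0 + 1) 1) []

-- ===== PORT A =====

-- the enumerate loop of A; current element at the head, env_res[i+1] is `next`
def chooseA (cb : List Int) (p tot : Int) : List Int → List (List Int) → List Int → List (List Int)
  | [], stretches, _ => stretches  -- unreachable guard (loop list is nonempty)
  | [_res], stretches, stretch =>  -- i == len(env_res) - 1: the END
    if stretch.length < 2 then stretches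
    else stretches ++ pyElong stretch p tot cb
  | _res :: next :: rest, stretches, stretch =>
    if (stretch.length : Int) ≥ p then
      chooseA cb p tot (next :: rest) (stretches ++ [stretch]) [next]
    else if _res + 1 = next ∧ _res + 1 ∉ cb then
      chooseA cb p tot (next :: rest) stretches (stretch ++ [next])
    else if stretch.length ≥ 2 then
      chooseA cb p tot (next :: rest) (stretches ++ pyElong stretch p tot cb) [next]
    else
      chooseA cb p tot (next :: rest) stretches [next]

def choose_stretches_only (env_res : List Int) (chain_breaks : List Int) (peplen : Int) (tot_res : Int) : List (List Int) :=
  match env_res with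
  | [] => []  -- Python raises IndexError here; excluded by Pre_
  | e0 :: _ => chooseA chain_breaks peplen tot_res env_res [] [e0]

-- ===== PORT B =====

-- pass 1: runs[-1].append(cur) / runs.append([cur]); `cur` is the run being built
def runsB (cb : List Int) (cur : List Int) (prev : Int) : List Int → List (List Int)
  | [] => [cur]
  | b :: rest =>
    if prev + 1 = b ∧ prev + 1 ∉ cb then runsB cb (cur ++ [b]) b rest
    else cur :: runsB cb [b] b rest

-- pass 2, one run: the n_full slice comprehension plus the elongated tail
def cutRun (cb : List Int) (p tot : Int) (nfull : Int) (run : List Int) : List (List Int) :=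
  ((PySem.List.pyRange 0 nfull 1).map
      (fun k => PySem.List.slice run (some (k * p)) (some ((k + 1) * p))))
    ++ (let tail := PySem.List.slice run (some (nfull * p)) none
        if tail.length ≥ 2 then pyElong tail p tot cb else [])

-- the `for run in runs[:-1]` loop, then the separate last-run block
def procRuns (cb : List Int) (p tot : Int) : List (List Int) → List (List Int)
  | [] => []
  | [last] => cutRun cb p tot (PySem.Int.floordiv ((last.length : Int) - 1) p) last
  | r :: r2 :: rs =>
      cutRun cb p tot (PySem.Int.floordiv (r.length : Int) p) r ++ procRuns cb p tot (r2 :: rs)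

def choose_stretches_only_alt (env_res : List Int) (chain_breaks : List Int) (peplen : Int) (tot_res : Int) : List (List Int) :=
  match env_res with
  | [] => []  -- excluded by Pre_
  | e0 :: rest => procRuns chain_breaks peplen tot_res (runsB chain_breaks [e0] e0 rest)

-- ===== PRECONDITION & SPEC =====
-- Pre_ excludes empty env_res, on which A raises IndexError, and peplen = 0, a
-- degenerate peptide length on which A's stream of singleton stretches is an
-- accident of its length test and B's chunk counting divides by zero.
def Pre_choose_stretches_only (env_res : List Int) (chain_breaks : List Int) (peplen : Int) (tot_res : Int) : Prop := env_res ≠ [] ∧ peplen ≠ 0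
instance (env_res : List Int) (chain_breaks : List Int) (peplen : Int) (tot_res : Int) : Decidable (Pre_choose_stretches_only env_res chain_breaks peplen tot_res) := by unfold Pre_choose_stretches_only; infer_instance

def pvWitness_choose_stretches_only : List Int × List Int × Int × Int := ([3, 4, 5, 9, 10], [6], 3, 12)

-- For negative peplen (with at least two residues) A returns one length-1 stretch per
-- non-final residue — stretches that cannot have the requested peptide length — while
-- B returns no stretches, the intended result for an impossible peptide length.
def D_choose_stretches_only (env_res : List Int) (chain_breaks : List Int) (peplen : Int) (tot_res : Int) : Prop := peplen < 0 ∧ 2 ≤ env_res.length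
instance (env_res : List Int) (chain_breaks : List Int) (peplen : Int) (tot_res : Int) : Decidable (D_choose_stretches_only env_res chain_breaks peplen tot_res) := by unfold D_choose_stretches_only; infer_instance

def Spec_choose_stretches_only (env_res : List Int) (chain_breaks : List Int) (peplen : Int) (tot_res : Int) (out : List (List Int)) : Prop := ¬ D_choose_stretches_only env_res chain_breaks peplen tot_res → out = choose_stretches_only_alt env_res chain_breaks peplen tot_res
instance (env_res : List Int) (chain_breaks : List Int) (peplen : Int) (tot_res : Int) (out : List (List Int)) : Decidable (Spec_choose_stretches_only env_res chain_breaks peplen tot_res out) := by unfold Spec_choose_stretches_only; infer_instance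

def pvDiffWitness_choose_stretches_only : List Int × List Int × Int × Int := ([1, 2], [], -1, 5)
def pvDiffWitnessOut_choose_stretches_only : (List (List Int)) × (List (List Int)) := ([[1]], [])

-- ===== CLAIM (what is proved, stated in full; the proofs are below) =====
def Claim_unchanged_choose_stretches_only : Prop := ∀ (env_res : List Int) (chain_breaks : List Int) (peplen : Int) (tot_res : Int), Dom_choose_stretches_only env_res chain_breaks peplen tot_res → Pre_choose_stretches_only env_res chain_breaks peplen tot_res → Spec_choose_stretches_only env_res chain_breaks peplen tot_res (choose_stretches_only env_res chain_breaks peplen tot_res)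
def Claim_changed_choose_stretches_only : Prop := Dom_choose_stretches_only (pvDiffWitness_choose_stretches_only.1) (pvDiffWitness_choose_stretches_only.2.1) (pvDiffWitness_choose_stretches_only.2.2.1) (pvDiffWitness_choose_stretches_only.2.2.2) ∧ Pre_choose_stretches_only (pvDiffWitness_choose_stretches_only.1) (pvDiffWitness_choose_stretches_only.2.1) (pvDiffWitness_choose_stretches_only.2.2.1) (pvDiffWitness_choose_stretches_only.2.2.2) ∧ D_choose_stretches_only (pvDiffWitness_choose_stretches_only.1) (pvDiffWitness_choose_stretches_only.2.1) (pvDiffWitness_choose_stretches_only.2.2.1) (pvDiffWitness_choose_stretches_only.2.2.2) ∧ choose_stretches_only (pvDiffWitness_choose_stretches_only.1) (pvDiffWitness_choose_stretches_only.2.1) (pvDiffWitness_choose_stretches_only.2.2.1) (pvDiffWitness_choose_stretches_only.2.2.2) = pvDiffWitnessOut_choose_stretches_only.1 ∧ choose_stretches_only_alt (pvDiffWitness_choose_stretches_only.1) (pvDiffWitness_choose_stretches_only.2.1) (pvDiffWitness_choose_stretches_only.2.2.1) (pvDiffWitness_choose_stretches_only.2.2.2) = pvDiffWitnessOut_choose_stretches_only.2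 ∧ pvDiffWitnessOut_choose_stretches_only.1 ≠ pvDiffWitnessOut_choose_stretches_only.2
def Claim_exact_choose_stretches_only : Prop := ∀ (env_res : List Int) (chain_breaks : List Int) (peplen : Int) (tot_res : Int), Dom_choose_stretches_only env_res chain_breaks peplen tot_res → Pre_choose_stretches_only env_res chain_breaks peplen tot_res → D_choose_stretches_only env_res chain_breaks peplen tot_res → choose_stretches_only env_res chain_breaks peplen tot_res ≠ choose_stretches_only_alt env_res chain_breaks peplen tot_res

-- ===== LEMMAS AND PROOFS =====

-- proof-side bridge: chunking a run as a take/drop recursion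
def chunkB (p tot : Int) (cb : List Int) (final : Bool) (run : List Int) : List (List Int) :=
  let c := max 1 p.toNat
  if run.length > c ∨ (final = false ∧ run.length = c) then
    run.take c :: chunkB p tot cb final (run.drop c)
  else if run.length ≥ 2 then pyElong run p tot cb
  else []
termination_by run.length
decreasing_by simp; omega

def procB (p tot : Int) (cb : List Int) : List (List Int) → List (List Int)
  | [] => []
  | [r] => chunkB p tot cb true r
  | r :: r2 :: rs => chunkB p tot cb false r ++ procB p tot cb (r2 :: rs)

-- the first run produced by runsB starts with cur
lemma runsB_cons (cb : List Int) (rest : List Int) : ∀ (prev : Int) (cur : List Int),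
    ∃ R Rs, runsB cb cur prev rest = (cur ++ R) :: Rs := by
  induction rest with
  | nil => intro prev cur; exact ⟨[], [], by simp [runsB]⟩
  | cons b rest ih =>
    intro prev cur
    rw [runsB]
    split_ifs with h
    · obtain ⟨R, Rs, hR⟩ := ih b (cur ++ [b])
      exact ⟨[b] ++ R, Rs, by rw [hR]; simp⟩
    · exact ⟨[], runsB cb [b] b rest, by simp⟩

-- peeling a prefix off the current run
lemma runsB_append (cb : List Int) (rest : List Int) : ∀ (prev : Int) (cur₁ cur₂ : List Int)
    (R : List Int) (Rs : List (List Int)), runsB cb cur₂ prev rest = R :: Rs →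
    runsB cb (cur₁ ++ cur₂) prev rest = (cur₁ ++ R) :: Rs := by
  induction rest with
  | nil =>
    intro prev cur₁ cur₂ R Rs h
    rw [runsB] at h ⊢
    obtain ⟨h1, h2⟩ := List.cons_eq_cons.mp h
    subst h1 h2
    rfl
  | cons b rest ih =>
    intro prev cur₁ cur₂ R Rs h
    rw [runsB] at h ⊢
    split_ifs at h ⊢ with hc
    · rw [List.append_assoc]
      exact ih b cur₁ (cur₂ ++ [b]) R Rs h
    · obtain ⟨h1, h2⟩ := List.cons_eq_cons.mp h
      subst h1 h2
      rfl

-- every run runsB produces is nonempty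
lemma runsB_ne (cb : List Int) (rest : List Int) : ∀ (prev : Int) (cur : List Int),
    cur ≠ [] → ∀ r ∈ runsB cb cur prev rest, r ≠ [] := by
  induction rest with
  | nil => intro prev cur hc r hr; rw [runsB] at hr; simp at hr; exact hr ▸ hc
  | cons b rest ih =>
    intro prev cur hc r hr
    rw [runsB] at hr
    split_ifs at hr with h
    · exact ih b (cur ++ [b]) (by simp) r hr
    · rcases List.mem_cons.mp hr with h1 | h2
      · exact h1 ▸ hc
      · exact ih b [b] (by simp) r h2

-- a run of exactly the chunk size is emitted as a single direct chunk
lemma chunkB_full (p tot : Int) (cb : List Int) (run : List Int)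
    (h : run.length = max 1 p.toNat) : chunkB p tot cb false run = [run] := by
  rw [chunkB]
  simp only [h]
  rw [if_pos (by simp)]
  rw [List.take_of_length_le (by omega), List.drop_of_length_le (by omega)]
  rw [chunkB]
  simp
  omega

-- a full chunk at the front of a run is cut off first
lemma procB_peel (p tot : Int) (cb : List Int) (x y : List Int) (Rs : List (List Int))
    (hx : x.length = max 1 p.toNat) (hy : y ≠ []) :
    procB p tot cb ((x ++ y) :: Rs) = x :: procB p tot cb (y :: Rs) := by
  have hcut : ∀ fin, chunkB p tot cb fin (x ++ y) = x :: chunkB p tot cb fin y := by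
    intro fin
    rw [chunkB]
    have hygt : 0 < y.length := List.length_pos_iff.mpr hy
    rw [if_pos (by left; simp [hx]; omega)]
    rw [List.take_left' hx, List.drop_left' hx]
  cases Rs with
  | nil => show chunkB p tot cb true (x ++ y) = _; rw [hcut]; rfl
  | cons r rs => show chunkB p tot cb false (x ++ y) ++ _ = _; rw [hcut]; rfl

-- invariant: A's running (stretches, stretch) state equals B's run decomposition
lemma main_loop (cb : List Int) (p tot : Int) (rest : List Int) :
    ∀ (prev : Int) (stretch : List Int) (stretches : List (List Int)),
      1 ≤ stretch.length → stretch.length ≤ max 1 p.toNat →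
      chooseA cb p tot (prev :: rest) stretches stretch
        = stretches ++ procB p tot cb (runsB cb stretch prev rest) := by
  induction rest with
  | nil =>
    intro prev stretch stretches h1 hc
    show (if stretch.length < 2 then stretches else stretches ++ pyElong stretch p tot cb)
        = stretches ++ procB p tot cb [stretch]
    show _ = stretches ++ chunkB p tot cb true stretch
    rw [chunkB]
    have hnc : ¬(stretch.length > max 1 p.toNat ∨ (true = false ∧ stretch.length = max 1 p.toNat)) := by
      simp; omega
    rw [if_neg hnc]
    by_cases h2 : stretch.length ≥ 2
    · rw [if_neg (by omega), if_pos h2]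
    · rw [if_pos (by omega), if_neg h2]
      simp
  | cons b rest' ih =>
    intro prev stretch stretches h1 hc
    rw [chooseA, runsB]
    by_cases hfull : (stretch.length : Int) ≥ p
    · rw [if_pos hfull]
      have hlc' : stretch.length = max 1 p.toNat := by omega
      rw [ih b [b] (stretches ++ [stretch]) (by simp) (by simp)]
      by_cases hseq : prev + 1 = b ∧ prev + 1 ∉ cb
      · rw [if_pos hseq]
        obtain ⟨R, Rs, hR⟩ := runsB_cons cb rest' b [b]
        rw [runsB_append cb rest' b stretch [b] ([b] ++ R) Rs hR]
        rw [procB_peel p tot cb stretch ([b] ++ R) Rs hlc' (by simp)]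
        rw [hR]
        simp
      · rw [if_neg hseq]
        obtain ⟨R, Rs, hR⟩ := runsB_cons cb rest' b [b]
        rw [hR]
        show _ = stretches ++ (chunkB p tot cb false stretch ++ procB p tot cb ((([b] : List Int) ++ R) :: Rs))
        rw [chunkB_full p tot cb stretch hlc']
        simp
    · rw [if_neg hfull]
      have hlt : stretch.length < max 1 p.toNat := by omega
      by_cases hseq : prev + 1 = b ∧ prev + 1 ∉ cb
      · rw [if_pos hseq, if_pos hseq]
        exact ih b (stretch ++ [b]) stretches (by simp) (by simp; omega)
      · rw [if_neg hseq, if_neg hseq]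
        obtain ⟨R, Rs, hR⟩ := runsB_cons cb rest' b [b]
        rw [hR]
        show _ = stretches ++ (chunkB p tot cb false stretch ++ procB p tot cb ((([b] : List Int) ++ R) :: Rs))
        have hnc : ¬(stretch.length > max 1 p.toNat ∨ (false = false ∧ stretch.length = max 1 p.toNat)) := by
          simp; omega
        by_cases h2 : stretch.length ≥ 2
        · rw [if_pos h2]
          rw [ih b [b] (stretches ++ pyElong stretch p tot cb) (by simp) (by simp)]
          rw [chunkB, if_neg hnc, if_pos h2]
          rw [hR]
          simp
        · rw [if_neg h2]
          rw [ih b [b] stretches (by simp) (by simp)]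
          rw [chunkB, if_neg hnc, if_neg h2]
          rw [hR]
          simp

-- B's slice comprehension, rewritten over List.range
lemma chunks_map (run : List Int) (p' n : Nat) :
    (PySem.List.pyRange 0 (n : Int) 1).map
        (fun k => PySem.List.slice run (some (k * (p' : Int))) (some ((k + 1) * (p' : Int))))
      = (List.range n).map (fun k => (run.drop (k * p')).take p') := by
  rw [PySem.List.pyRange_zero_natCast, List.map_map]
  apply List.map_congr_left
  intro k _
  have h1 : ((k : Int)) * (p' : Int) = ((k * p' : Nat) : Int) := by push_cast; ring
  have h2 : ((k : Int) + 1) * (p' : Int) = (((k + 1) * p' : Nat) : Int) := by push_cast; ring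
  simp only [Function.comp_apply, h1, h2, PySem.List.slice_natCast]
  congr 1
  have : (k + 1) * p' = k * p' + p' := by ring
  rw [this, Nat.add_sub_cancel_left]

-- B's arithmetic chunking of one run equals the take/drop recursion
lemma cutRun_eq (cb : List Int) (tot : Int) (p' : Nat) (hp1 : 1 ≤ p') :
    ∀ (n : Nat) (run : List Int) (final : Bool), run.length = n → run ≠ [] →
    cutRun cb (p' : Int) tot
        (PySem.Int.floordiv ((run.length : Int) - (if final then 1 else 0)) (p' : Int)) run
      = chunkB (p' : Int) tot cb final run := by
  intro n
  induction n using Nat.strong_induction_on with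
  | _ n ih =>
    intro run final hlen hne
    have hl1 : 1 ≤ run.length := List.length_pos_iff.mpr hne
    have hmax : max 1 ((p' : Int)).toNat = p' := by
      rw [Int.toNat_natCast]; omega
    have hcast : ((run.length : Int) - (if final then (1 : Int) else 0))
        = ((run.length - (if final then 1 else 0) : Nat) : Int) := by
      cases final <;> simp <;> omega
    rw [hcast, PySem.Int.floordiv_natCast]
    set s : Nat := if final then 1 else 0 with hs
    have hsle : s ≤ 1 := by cases final <;> simp [hs]
    by_cases hC : run.length > max 1 ((p' : Int)).toNat ∨ (final = false ∧ run.length = max 1 ((p' : Int)).toNat)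
    · by_cases hgt : run.length > p'
      · -- a full chunk comes off the front; recurse on the dropped run
        have hsf : s ≤ run.length - p' := by
          cases final <;> simp [hs] <;> omega
        have hdiv : (run.length - s) / p' = ((run.length - p') - s) / p' + 1 := by
          rw [show (run.length - p') - s = (run.length - s) - p' by omega]
          exact Nat.div_eq_sub_div (by omega) (by omega)
        have hdne : run.drop p' ≠ [] := by
          intro h
          have := congrArg List.length h
          simp at this
          omega
        have hrec := ih (run.length - p') (by omega) (run.drop p') final (by simp) hdne
        have hcast2 : (((run.drop p').length : Int) - (if final then (1 : Int) else 0))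
            = (((run.length - p') - s : Nat) : Int) := by
          cases final <;> simp [hs] <;> omega
        rw [hcast2, PySem.Int.floordiv_natCast] at hrec
        rw [chunkB, if_pos hC, hmax, ← hrec, hdiv]
        set q := ((run.length - p') - s) / p' with hq
        simp only [cutRun]
        rw [chunks_map, chunks_map, List.range_succ_eq_map, List.map_cons, List.map_map,
          List.cons_append]
        congr 1
        · simp
        congr 1
        · apply List.map_congr_left
          intro k _
          simp only [Function.comp_apply]
          rw [List.drop_drop]
          congr 2
          rw [Nat.succ_mul]; omega
        · rw [show ((((q + 1 : Nat)) : Int)) * (p' : Int) = (((q + 1) * p' : Nat) : Int) by push_cast; ring]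
          rw [show (((q : Nat)) : Int) * (p' : Int) = ((q * p' : Nat) : Int) by push_cast; ring]
          rw [PySem.List.slice_from_natCast, PySem.List.slice_from_natCast]
          rw [List.drop_drop]
          rw [show p' + q * p' = (q + 1) * p' by ring]
      · -- exactly one full chunk: the run IS the chunk
        have hf : final = false := by
          rcases hC with h | h
          · omega
          · exact h.1
        have hlp : run.length = p' := by
          rcases hC with h | h
          · omega
          · rw [h.2, hmax]
        subst hf
        have hs0 : s = 0 := by simp [hs]
        rw [hs0, Nat.sub_zero, hlp, Nat.div_self (by omega : 0 < p')]
        have hd : run.drop p' = [] := by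
          apply List.eq_nil_of_length_eq_zero
          simp [hlp]
        rw [chunkB_full (p' : Int) tot cb run (by rw [hmax]; exact hlp)]
        simp only [cutRun]
        rw [chunks_map]
        rw [show (((1 : Nat)) : Int) * (p' : Int) = ((p' : Nat) : Int) by push_cast; ring]
        rw [PySem.List.slice_from_natCast, hd]
        simp [List.take_of_length_le (le_of_eq hlp)]
    · -- no full chunk: only the elongated tail
      have hml : run.length - s < p' := by
        have h2 := hC
        rw [hmax] at h2
        push Not at h2
        cases final <;> simp [hs] at h2 ⊢ <;> omega
      rw [Nat.div_eq_of_lt hml]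
      simp only [cutRun]
      rw [chunks_map]
      rw [show (((0 : Nat)) : Int) * (p' : Int) = (((0 : Nat)) : Int) by push_cast; ring]
      rw [PySem.List.slice_from_natCast, List.drop_zero]
      rw [chunkB, if_neg hC]
      simp

-- pass 2 as a whole equals the take/drop formulation, run by run
lemma proc_eq (cb : List Int) (tot : Int) (p' : Nat) (hp1 : 1 ≤ p') :
    ∀ (rs : List (List Int)), (∀ r ∈ rs, r ≠ []) →
    procRuns cb (p' : Int) tot rs = procB (p' : Int) tot cb rs := by
  intro rs
  induction rs with
  | nil => intro _; rfl
  | cons r rs ih =>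
    intro hne
    cases rs with
    | nil =>
      show cutRun cb (p' : Int) tot (PySem.Int.floordiv ((r.length : Int) - 1) (p' : Int)) r
          = chunkB (p' : Int) tot cb true r
      have := cutRun_eq cb tot p' hp1 r.length r true rfl (hne r (by simp))
      simpa using this
    | cons r2 rs2 =>
      show cutRun cb (p' : Int) tot (PySem.Int.floordiv ((r.length : Int)) (p' : Int)) r ++ _ = _
      have h1 := cutRun_eq cb tot p' hp1 r.length r false rfl (hne r (by simp))
      simp only [if_neg (Bool.false_ne_true), sub_zero] at h1
      rw [h1]
      show _ = chunkB (p' : Int) tot cb false r ++ procB (p' : Int) tot cb (r2 :: rs2)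
      rw [ih (fun x hx => hne x (by simp [hx]))]

-- ===== VERDICT (by name: the statement is the Claim_ definition above) =====
theorem choose_stretches_only_spec : Claim_unchanged_choose_stretches_only := by
  intro env cb p tot _dom hpre hnd
  obtain ⟨hne, hp0⟩ := hpre
  match env with
  | [] => exact absurd rfl hne
  | e0 :: rest =>
    by_cases hp : 1 ≤ p
    · -- positive peplen: the two decompositions agree everywhere
      show chooseA cb p tot (e0 :: rest) [] [e0]
          = procRuns cb p tot (runsB cb [e0] e0 rest)
      rw [main_loop cb p tot rest e0 [e0] [] (by simp) (by simp)]
      have hsub : p = ((p.toNat : Nat) : Int) := by omega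
      rw [List.nil_append, hsub]
      rw [proc_eq cb tot p.toNat (by omega) _ (runsB_ne cb rest e0 [e0] (by simp))]
    · -- negative peplen: ¬D forces a single residue; both return []
      have hrest : rest = [] := by
        unfold D_choose_stretches_only at hnd
        cases rest with
        | nil => rfl
        | cons a l => exact absurd ⟨by omega, by simp⟩ hnd
      subst hrest
      show chooseA cb p tot [e0] [] [e0] = procRuns cb p tot (runsB cb [e0] e0 [])
      rw [chooseA, if_pos (by simp)]
      show ([] : List (List Int)) = procRuns cb p tot [[e0]]
      show ([] : List (List Int)) = cutRun cb p tot (PySem.Int.floordiv ((1 : Int) - 1) p) [e0]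
      have h0 : PySem.Int.floordiv ((1 : Int) - 1) p = 0 := by
        norm_num [PySem.Int.floordiv, Int.zero_fdiv]
      rw [h0]
      have hpr : PySem.List.pyRange (0 : Int) 0 = [] := by
        apply List.eq_nil_of_length_eq_zero
        rw [PySem.List.length_pyRange_one]
        simp
      simp only [cutRun]
      rw [hpr, zero_mul, PySem.List.slice_from [e0] (le_refl (0 : Int))]
      simp

theorem choose_stretches_only_changed : Claim_changed_choose_stretches_only := by
  unfold Claim_changed_choose_stretches_only; decide

-- with a negative peplen, one run contributes nothing in B
lemma cutRun_neg (cb : List Int) (p tot : Int) (hp : p < 0) (run : List Int)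
    (hl1 : 1 ≤ run.length) (s : Int) (hs0 : 0 ≤ s) (hs1 : s ≤ 1) (hsl : s ≤ (run.length : Int)) :
    cutRun cb p tot (PySem.Int.floordiv ((run.length : Int) - s) p) run = [] := by
  set m : Int := (run.length : Int) - s with hm
  have hm0 : 0 ≤ m := by omega
  set q : Int := PySem.Int.floordiv m p with hq
  have hmod := PySem.Int.mod_neg_bounds m hp
  have hqp : q * p + PySem.Int.mod m p = m := PySem.Int.floordiv_mul_add_mod m p
  have hq0 : q ≤ 0 := by
    by_contra hc
    push Not at hc
    have h1 : q * p ≤ q * (-1) := by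
      apply mul_le_mul_of_nonneg_left (by omega) (by omega)
    omega
  have hqpm : m ≤ q * p := by omega
  have hpr : PySem.List.pyRange 0 q = [] := by
    apply List.eq_nil_of_length_eq_zero
    rw [PySem.List.length_pyRange_one]
    omega
  have hqp0 : 0 ≤ q * p := by omega
  simp only [cutRun]
  rw [hpr, PySem.List.slice_from run hqp0]
  have htl : (run.drop (q * p).toNat).length ≤ 1 := by
    rw [List.length_drop]
    omega
  rw [if_neg (by omega)]
  simp

-- with a negative peplen, B returns no stretches at all
lemma B_neg (cb : List Int) (p tot : Int) (hp : p < 0) :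
    ∀ (rs : List (List Int)), (∀ r ∈ rs, r ≠ []) → procRuns cb p tot rs = [] := by
  intro rs
  induction rs with
  | nil => intro _; rfl
  | cons r rs ih =>
    intro hne
    have hl1 : 1 ≤ r.length := List.length_pos_iff.mpr (hne r (by simp))
    cases rs with
    | nil =>
      show cutRun cb p tot (PySem.Int.floordiv ((r.length : Int) - 1) p) r = []
      exact cutRun_neg cb p tot hp r hl1 1 (by omega) (by omega) (by exact_mod_cast hl1)
    | cons r2 rs2 =>
      show cutRun cb p tot (PySem.Int.floordiv ((r.length : Int)) p) r ++ _ = []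
      rw [show ((r.length : Int)) = ((r.length : Int) - 0) by ring]
      rw [cutRun_neg cb p tot hp r hl1 0 (by omega) (by omega) (by positivity)]
      rw [ih (fun x hx => hne x (by simp [hx]))]
      rfl

-- with a negative peplen, A emits one stretch per consumed residue
lemma A_grow (cb : List Int) (p tot : Int) (hp : p < 0) :
    ∀ (rest : List Int) (x y : Int) (st : List (List Int)) (stretch : List Int),
      1 ≤ stretch.length → st.length < (chooseA cb p tot (x :: y :: rest) st stretch).length := by
  intro rest
  induction rest with
  | nil =>
    intro x y st stretch h1
    rw [chooseA, if_pos (by omega)]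
    show st.length < (if ([y] : List Int).length < 2 then st ++ [stretch] else _).length
    rw [if_pos (by simp)]
    simp
  | cons z rest ih =>
    intro x y st stretch h1
    rw [chooseA, if_pos (by omega)]
    have := ih y z (st ++ [stretch]) [y] (by simp)
    simp only [List.length_append, List.length_cons] at this ⊢
    omega

theorem choose_stretches_only_tight : Claim_exact_choose_stretches_only := by
  intro env cb p tot _dom hpre hD
  obtain ⟨hpneg, hlen2⟩ := hD
  match env, hlen2 with
  | e0 :: e1 :: rest, _ =>
    intro heq
    have hA : 0 < (chooseA cb p tot (e0 :: e1 :: rest) [] [e0]).length :=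
      A_grow cb p tot hpneg rest e0 e1 [] [e0] (by simp)
    have hB : choose_stretches_only_alt (e0 :: e1 :: rest) cb p tot = [] := by
      show procRuns cb p tot (runsB cb [e0] e0 (e1 :: rest)) = []
      exact B_neg cb p tot hpneg _ (runsB_ne cb (e1 :: rest) e0 [e0] (by simp))
    rw [hB] at heq
    rw [show choose_stretches_only (e0 :: e1 :: rest) cb p tot
        = chooseA cb p tot (e0 :: e1 :: rest) [] [e0] from rfl] at heq
    rw [heq] at hA
    simp at hA
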